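-- pv_equiv track=rewrite | github.com/songweizhi/HgtSIM | test_1.py | remove_excrescent
-- ===== SOURCE A (Python) =====
-- def remove_excrescent(list_in, total):
--     sum = 0
--     list_out = []
--     for each_num in list_in:
--         sum += each_num
--         if sum <= total:
--             list_out.append(each_num)
--         elif sum > total:
--             diff = sum - total
--             list_out.append(each_num - diff)
--     return list_out
-- ===== SOURCE B (Python) =====
-- def remove_excrescent(list_in, total):
--     # Back-to-front: compute the whole sum once, then walk the list reversed
--     # maintaining the budget remaining BEFORE each element; each output is
--     # min(element, budget).  Reverse at the end.
--     r = total - sum(list_in)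
--     out = []
--     for x in reversed(list_in):
--         r += x
--         out.append(min(x, r))
--     out.reverse()
--     return out
-- ===== Notes on version B (the rewrite author's own statement) =====
-- stated objective: alternative
-- what changed: A's forward loop tracking the running prefix sum and conditionally subtracting the overflow is replaced by summing the list once, traversing it back-to-front while maintaining the remaining budget before each element, emitting min(element, budget), and reversing the result.
import Mathlib
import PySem

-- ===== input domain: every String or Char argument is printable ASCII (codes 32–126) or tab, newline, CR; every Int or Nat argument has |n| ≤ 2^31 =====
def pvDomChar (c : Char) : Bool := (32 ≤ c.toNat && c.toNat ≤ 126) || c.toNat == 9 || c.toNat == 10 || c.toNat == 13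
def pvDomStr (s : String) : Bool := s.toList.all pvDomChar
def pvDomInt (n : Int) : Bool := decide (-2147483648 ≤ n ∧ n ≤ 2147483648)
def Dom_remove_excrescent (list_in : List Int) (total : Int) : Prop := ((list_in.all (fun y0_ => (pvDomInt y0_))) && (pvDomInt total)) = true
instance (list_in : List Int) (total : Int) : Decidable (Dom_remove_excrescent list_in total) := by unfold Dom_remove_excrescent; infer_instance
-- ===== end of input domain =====

-- B replaces A's forward prefix-sum loop with conditional overflow subtraction by: sum the
-- list once, walk it back-to-front maintaining the remaining budget before each element,
-- emit min(element, budget), and reverse at the end (alternative decomposition; same cost).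

-- ===== PORT A =====
-- the for-loop with mutable `sum` and `list_out`, branch order as in A
def remove_excrescent_loop (total : Int) : List Int → Int → List Int
  | [], _ => []
  | each_num :: rest, sum =>
      let sum' := sum + each_num
      if sum' ≤ total then each_num :: remove_excrescent_loop total rest sum'
      else if sum' > total then
        let diff := sum' - total
        (each_num - diff) :: remove_excrescent_loop total rest sum'
      else remove_excrescent_loop total rest sum'

def remove_excrescent (list_in : List Int) (total : Int) : List Int :=
  remove_excrescent_loop total list_in 0

-- ===== PORT B =====
-- `r = total - sum(list_in)`, then the reversed loop `r += x; out.append(min(x, r))`,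
-- then `out.reverse()`
def remove_excrescent_alt (list_in : List Int) (total : Int) : List Int :=
  let p := list_in.reverse.foldl
    (fun (acc : Int × List Int) x => (acc.1 + x, acc.2 ++ [min x (acc.1 + x)]))
    (total - list_in.sum, [])
  p.2.reverse

-- ===== PRECONDITION & SPEC =====
def Spec_remove_excrescent (list_in : List Int) (total : Int) (out : List Int) : Prop := out = remove_excrescent_alt list_in total
instance (list_in : List Int) (total : Int) (out : List Int) : Decidable (Spec_remove_excrescent list_in total out) := by unfold Spec_remove_excrescent; infer_instance

-- ===== CLAIM (what is proved, stated in full; the proofs are below) =====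
def Claim_equal_remove_excrescent : Prop := ∀ (list_in : List Int) (total : Int), Dom_remove_excrescent list_in total → Spec_remove_excrescent list_in total (remove_excrescent list_in total)

-- ===== LEMMAS AND PROOFS =====
-- common characterisation: element-wise min against the remaining budget
def budgetMap : List Int → Int → List Int
  | [], _ => []
  | x :: xs, r => min x r :: budgetMap xs (r - x)

-- the list produced by B's reversed loop starting with budget-after value r
def gList : List Int → Int → List Int
  | [], _ => []
  | x :: xs, r => min x (r + x) :: gList xs (r + x)

lemma A_eq_budgetMap (total : Int) : ∀ (xs : List Int) (s : Int),
    remove_excrescent_loop total xs s = budgetMap xs (total - s) := by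
  intro xs
  induction xs with
  | nil => intro s; rfl
  | cons x rest ih =>
      intro s
      simp only [remove_excrescent_loop, budgetMap, ih]
      by_cases h : s + x ≤ total
      · have hm : min x (total - s) = x := min_eq_left (by omega)
        simp [h, hm, sub_sub]
      · have hm : min x (total - s) = total - s := min_eq_right (by omega)
        have h' : s + x > total := by omega
        simp [h, h', hm, sub_sub]
        omega

lemma foldl_gList : ∀ (ys : List Int) (r0 : Int) (out0 : List Int),
    ys.foldl (fun (acc : Int × List Int) x => (acc.1 + x, acc.2 ++ [min x (acc.1 + x)]))
      (r0, out0) = (r0 + ys.sum, out0 ++ gList ys r0) := by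
  intro ys
  induction ys with
  | nil => intro r0 out0; simp [gList]
  | cons x xs ih =>
      intro r0 out0
      simp [List.foldl_cons, ih, gList, add_assoc]

lemma gList_append (ys zs : List Int) : ∀ r : Int,
    gList (ys ++ zs) r = gList ys r ++ gList zs (r + ys.sum) := by
  induction ys with
  | nil => intro r; simp [gList]
  | cons x xs ih =>
      intro r
      simp [gList, ih, add_assoc]

lemma gList_reverse : ∀ (xs : List Int) (r : Int),
    (gList xs.reverse (r - xs.sum)).reverse = budgetMap xs r := by
  intro xs
  induction xs with
  | nil => intro r; rfl
  | cons a t ih =>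
      intro r
      have hsum : (t.reverse).sum = t.sum := by simp
      have : (a :: t).reverse = t.reverse ++ [a] := by simp
      rw [this, gList_append]
      have harg : r - (a :: t).sum = (r - a) - t.sum := by simp [List.sum_cons]; ring
      rw [harg, hsum]
      have h2 : (r - a) - t.sum + t.sum = r - a := by ring
      rw [h2]
      simp only [gList, List.reverse_append, List.reverse_cons, List.reverse_nil,
        List.nil_append]
      have hmin : (r - a) + a = r := by ring
      rw [hmin, ih (r - a)]
      rfl

-- ===== VERDICT (by name: the statement is the Claim_ definition above) =====
theorem remove_excrescent_spec : Claim_equal_remove_excrescent := by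
  intro list_in total _
  unfold Spec_remove_excrescent remove_excrescent remove_excrescent_alt
  rw [A_eq_budgetMap, foldl_gList]
  simp only [List.nil_append]
  rw [show total - 0 = total by ring, ← gList_reverse list_in total]
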